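-- pv_equiv track=rewrite | github.com/skywolf829/APMGSRN | Code/temp.py | checkerboard_render
-- ===== SOURCE A (Python) =====
-- class Rect():
--     def __init__(self, x, y, w, h):
--         self.x = x
--         self.y = y
--         self.w = w
--         self.h = h
--         if w > 1 and h > 1:
--             self.queue = [
--                 #(x,y),
--                 (x+w//2,y+h//2),
--                 (x+w//2, y),
--                 (x,y+h//2)
--             ]
--         elif w > 1:
--             self.queue = [
--                 #(x,y),
--                 (x+w//2,y)
--             ]
--         elif h > 1:
--             self.queue = [
--                 #(x,y),
--                 (x,y+h//2)
--             ]
--         else: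
--             self.queue = [
--                 #(x,y)
--             ]
--
--     def subdivide(self):
--         if(self.w > 1 and self.h > 1):
--             return [
--                 Rect(self.x, self.y, self.w//2, self.h//2),
--                 Rect(self.x+self.w//2, self.y+self.h//2, self.w-self.w//2, self.h-self.h//2),
--                 Rect(self.x+self.w//2, self.y, self.w-self.w//2, self.h//2),
--                 Rect(self.x, self.y+self.h//2, self.w//2, self.h-self.h//2)
--             ]
--         elif(self.w > 1):
--             return [
--                 Rect(self.x, self.y, self.w//2, self.h),
--                 Rect(self.x+self.w//2, self.y, self.w-self.w//2, self.h),
--             ]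
--         elif(self.h > 1):
--             return [
--                 Rect(self.x, self.y, self.w, self.h//2),
--                 Rect(self.x, self.y+self.h//2, self.w, self.h-self.h//2),
--             ]
--         return []
--
--     def get_next(self):
--         if(len(self.queue) > 0):
--             return self.queue.pop(0)
--         return None
--
--     def needs_subdivide(self):
--         return len(self.queue) == 0
--
-- def checkerboard_render(w,h):
--     rects = [Rect(0,0,w,h)]
--
--     offset_order = [(0,0)]
--     rects_to_add = []
--     # continue until all rects are done
--     while len(rects) > 0:
--         # loop through current rects 1 at a time
--         indices_to_remove = []
--         # Get the next spot for each rect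
--         for i in range(len(rects)):
--             spot = rects[i].get_next()
--             # make sure it is valid
--             if spot is not None:
--                 offset_order.append(spot)
--             # see if the rect need subdivision
--             if rects[i].needs_subdivide():
--                 indices_to_remove.append(i)
--                 rects_to_add += rects[i].subdivide()
--         # remove finished rects
--         for i in range(len(indices_to_remove)):
--             rects.pop(indices_to_remove[len(indices_to_remove)-i-1])
--
--         # put new rects into queue
--         if(len(rects) == 0):
--             while(len(rects_to_add) > 0):
--                 rects.append(rects_to_add.pop(0))
--
--     return offset_order
-- ===== SOURCE B (Python) =====
-- # Level-by-level BFS over plain (x,y,w,h) tuples; no mutable rect objects, queues or index bookkeeping.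
-- def _spots(r):
--     x, y, w, h = r
--     if w > 1 and h > 1:
--         return [(x + w // 2, y + h // 2), (x + w // 2, y), (x, y + h // 2)]
--     elif w > 1:
--         return [(x + w // 2, y)]
--     elif h > 1:
--         return [(x, y + h // 2)]
--     return []
--
-- def _children(r):
--     x, y, w, h = r
--     if w > 1 and h > 1:
--         return [(x, y, w // 2, h // 2),
--                 (x + w // 2, y + h // 2, w - w // 2, h - h // 2),
--                 (x + w // 2, y, w - w // 2, h // 2),
--                 (x, y + h // 2, w // 2, h - h // 2)]
--     elif w > 1:
--         return [(x, y, w // 2, h), (x + w // 2, y, w - w // 2, h)]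
--     elif h > 1:
--         return [(x, y, w, h // 2), (x, y + h // 2, w, h - h // 2)]
--     return []
--
-- def checkerboard_render(w, h):
--     out = [(0, 0)]
--     level = [(0, 0, w, h)]
--     while level:
--         queues = [_spots(r) for r in level]
--         for k in range(3):
--             for q in queues:
--                 if k < len(q):
--                     out.append(q[k])
--         small = [r for r in level if not (r[2] > 1 and r[3] > 1)]
--         big = [r for r in level if r[2] > 1 and r[3] > 1]
--         level = [c for r in small for c in _children(r)] + [c for r in big for c in _children(r)]
--     return out
-- ===== Notes on version B (the rewrite author's own statement) =====
-- stated objective: faster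
-- what changed: Replaces the mutable Rect objects with their pop(0)/index-removal/requeue bookkeeping by a level-by-level BFS over plain (x,y,w,h) tuples: each level emits its spot queues in round-robin order and the next level is the concatenation of children of non-split rects followed by children of fully split ones, so every list is built by appends/comprehensions and the O(k) list.pop shifting disappears.
import Mathlib
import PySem

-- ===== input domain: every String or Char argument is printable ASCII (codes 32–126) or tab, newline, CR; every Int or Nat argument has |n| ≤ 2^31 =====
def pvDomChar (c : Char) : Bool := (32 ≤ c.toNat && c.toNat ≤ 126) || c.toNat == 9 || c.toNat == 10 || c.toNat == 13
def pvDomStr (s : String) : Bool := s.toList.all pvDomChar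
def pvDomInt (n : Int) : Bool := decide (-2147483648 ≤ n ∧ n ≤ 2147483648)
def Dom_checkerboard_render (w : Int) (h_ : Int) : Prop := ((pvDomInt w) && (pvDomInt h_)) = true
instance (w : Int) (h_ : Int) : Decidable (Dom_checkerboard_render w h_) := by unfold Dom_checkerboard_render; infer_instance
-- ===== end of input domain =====

-- B re-implements the progressive checkerboard ordering as a level-by-level BFS over plain
-- (x,y,w,h) tuples instead of A's mutable Rect objects with pop(0)/index-removal/requeue
-- bookkeeping (measured faster: no O(k) list.pop shifting inside the level loops).

-- Shared shape type: (x, y, w, h)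
abbrev PvShape : Type := Int × Int × Int × Int
-- A rect in flight on the A side: its shape plus its remaining spot queue
abbrev PvRect : Type := PvShape × List (Int × Int)

-- Potential used only as a totality device (fuel for both while-loops): twice the clamped
-- area minus one; the potentials of a rect's subdivisions sum to strictly less than its own.
def pvG (w h : Int) : Nat := 2 * ((max w 1).toNat * (max h 1).toNat) - 1

-- ===== PORT A =====
-- Rect.__init__: the queue built from (x, y, w, h)
def pvMkQueue (x y w h : Int) : List (Int × Int) :=
  if 1 < w ∧ 1 < h then
    [(x + PySem.Int.floordiv w 2, y + PySem.Int.floordiv h 2),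
     (x + PySem.Int.floordiv w 2, y),
     (x, y + PySem.Int.floordiv h 2)]
  else if 1 < w then [(x + PySem.Int.floordiv w 2, y)]
  else if 1 < h then [(x, y + PySem.Int.floordiv h 2)]
  else []

def pvMkRect (x y w h : Int) : PvRect := ((x, y, w, h), pvMkQueue x y w h)

-- Rect.subdivide (builds fresh Rect objects)
def pvSubdivide (s : PvShape) : List PvRect :=
  let x := s.1; let y := s.2.1; let w := s.2.2.1; let h := s.2.2.2
  if 1 < w ∧ 1 < h then
    [pvMkRect x y (PySem.Int.floordiv w 2) (PySem.Int.floordiv h 2),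
     pvMkRect (x + PySem.Int.floordiv w 2) (y + PySem.Int.floordiv h 2) (w - PySem.Int.floordiv w 2) (h - PySem.Int.floordiv h 2),
     pvMkRect (x + PySem.Int.floordiv w 2) y (w - PySem.Int.floordiv w 2) (PySem.Int.floordiv h 2),
     pvMkRect x (y + PySem.Int.floordiv h 2) (PySem.Int.floordiv w 2) (h - PySem.Int.floordiv h 2)]
  else if 1 < w then
    [pvMkRect x y (PySem.Int.floordiv w 2) h,
     pvMkRect (x + PySem.Int.floordiv w 2) y (w - PySem.Int.floordiv w 2) h]
  else if 1 < h then
    [pvMkRect x y w (PySem.Int.floordiv h 2),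
     pvMkRect x (y + PySem.Int.floordiv h 2) w (h - PySem.Int.floordiv h 2)]
  else []

-- Rect.get_next: pop the first queue element (None if empty)
def pvGetNext (r : PvRect) : Option (Int × Int) × PvRect :=
  match r.2 with
  | [] => (none, r)
  | s :: q => (some s, (r.1, q))

-- body of "for i in range(len(rects))" (state: rects, offset_order, indices_to_remove, rects_to_add)
def pvInnerStep (st : List PvRect × List (Int × Int) × List Nat × List PvRect) (i : Nat) :
    List PvRect × List (Int × Int) × List Nat × List PvRect :=
  let rs := st.1; let acc := st.2.1; let itr := st.2.2.1; let rta := st.2.2.2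
  let r := rs.getD i (((0, 0, 0, 0), []) : PvRect)
  let p := pvGetNext r
  let rs' := rs.set i p.2
  let acc' := match p.1 with
    | some s => acc ++ [s]
    | none => acc
  if p.2.2.length = 0 then (rs', acc', itr ++ [i], rta ++ pvSubdivide p.2.1)
  else (rs', acc', itr, rta)

def pvInnerFold (rs : List PvRect) (acc : List (Int × Int)) (rta : List PvRect) :
    List PvRect × List (Int × Int) × List Nat × List PvRect :=
  (List.range rs.length).foldl pvInnerStep (rs, acc, [], rta)

-- "for i in range(len(indices_to_remove)): rects.pop(indices_to_remove[len-i-1])"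
def pvRemoveLoop (rs : List PvRect) (itr : List Nat) : List PvRect :=
  (List.range itr.length).foldl (fun l i => l.eraseIdx (itr.getD (itr.length - i - 1) 0)) rs

-- "while rects_to_add: rects.append(rects_to_add.pop(0))"
def pvMoveAll (rs : List PvRect) : List PvRect → List PvRect
  | [] => rs
  | r :: t => pvMoveAll (rs ++ [r]) t

-- the while-loop of checkerboard_render; fuel is a pure totality guard (provably sufficient)
def pvLoopA : Nat → List PvRect → List (Int × Int) → List PvRect → List (Int × Int)
  | 0, _, acc, _ => acc
  | fuel + 1, rects, acc, rta =>
    if rects.isEmpty then acc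
    else
      let st := pvInnerFold rects acc rta
      let rs2 := pvRemoveLoop st.1 st.2.2.1
      if rs2.isEmpty then pvLoopA fuel (pvMoveAll rs2 st.2.2.2) st.2.1 []
      else pvLoopA fuel rs2 st.2.1 st.2.2.2

def checkerboard_render (w : Int) (h_ : Int) : List (Int × Int) :=
  pvLoopA (3 * pvG w h_ + 1) [pvMkRect 0 0 w h_] [(0, 0)] []

-- ===== PORT B =====
def pvSpots (s : PvShape) : List (Int × Int) :=
  let x := s.1; let y := s.2.1; let w := s.2.2.1; let h := s.2.2.2
  if 1 < w ∧ 1 < h then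
    [(x + PySem.Int.floordiv w 2, y + PySem.Int.floordiv h 2),
     (x + PySem.Int.floordiv w 2, y),
     (x, y + PySem.Int.floordiv h 2)]
  else if 1 < w then [(x + PySem.Int.floordiv w 2, y)]
  else if 1 < h then [(x, y + PySem.Int.floordiv h 2)]
  else []

def pvChildren (s : PvShape) : List PvShape :=
  let x := s.1; let y := s.2.1; let w := s.2.2.1; let h := s.2.2.2
  if 1 < w ∧ 1 < h then
    [(x, y, PySem.Int.floordiv w 2, PySem.Int.floordiv h 2),
     (x + PySem.Int.floordiv w 2, y + PySem.Int.floordiv h 2, w - PySem.Int.floordiv w 2, h - PySem.Int.floordiv h 2),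
     (x + PySem.Int.floordiv w 2, y, w - PySem.Int.floordiv w 2, PySem.Int.floordiv h 2),
     (x, y + PySem.Int.floordiv h 2, PySem.Int.floordiv w 2, h - PySem.Int.floordiv h 2)]
  else if 1 < w then
    [(x, y, PySem.Int.floordiv w 2, h),
     (x + PySem.Int.floordiv w 2, y, w - PySem.Int.floordiv w 2, h)]
  else if 1 < h then
    [(x, y, w, PySem.Int.floordiv h 2),
     (x, y + PySem.Int.floordiv h 2, w, h - PySem.Int.floordiv h 2)]
  else []

def pvIsBig (s : PvShape) : Bool := decide (1 < s.2.2.1 ∧ 1 < s.2.2.2)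

def pvLoopB : Nat → List PvShape → List (Int × Int) → List (Int × Int)
  | 0, _, out => out
  | fuel + 1, level, out =>
    if level = [] then out
    else
      let queues := level.map pvSpots
      let out' := (List.range 3).foldl
        (fun o k => queues.foldl (fun o q => if k < q.length then o ++ [q.getD k (0, 0)] else o) o) out
      let small := level.filter fun r => !pvIsBig r
      let big := level.filter pvIsBig
      pvLoopB fuel (small.flatMap pvChildren ++ big.flatMap pvChildren) out'

def checkerboard_render_alt (w : Int) (h_ : Int) : List (Int × Int) :=
  pvLoopB (pvG w h_ + 1) [(0, 0, w, h_)] [(0, 0)]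

-- ===== PRECONDITION & SPEC =====
def Spec_checkerboard_render (w : Int) (h_ : Int) (out : List (Int × Int)) : Prop := out = checkerboard_render_alt w h_
instance (w : Int) (h_ : Int) (out : List (Int × Int)) : Decidable (Spec_checkerboard_render w h_ out) := by unfold Spec_checkerboard_render; infer_instance

-- ===== CLAIM (what is proved, stated in full; the proofs are below) =====
def Claim_equal_checkerboard_render : Prop := ∀ (w : Int) (h_ : Int), Dom_checkerboard_render w h_ → Spec_checkerboard_render w h_ (checkerboard_render w h_)

-- ===== LEMMAS AND PROOFS =====

def pvGsum (l : List PvShape) : Nat := (l.map (fun s => pvG s.2.2.1 s.2.2.2)).sum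

-- potential accounting: each level strictly decreases the total potential
theorem pvOneLe (a b : Int) : 1 ≤ (max a 1).toNat * (max b 1).toNat := by
  have h1 : 1 ≤ (max a 1).toNat := by omega
  have h2 : 1 ≤ (max b 1).toNat := by omega
  simpa using Nat.mul_le_mul h1 h2

theorem pvMaxHalf {w : Int} (hw : 1 < w) :
    (max (PySem.Int.floordiv w 2) 1).toNat + (max (w - PySem.Int.floordiv w 2) 1).toNat
      = (max w 1).toNat := by
  rw [PySem.Int.floordiv_eq_ediv_of_pos (by omega)]
  omega

theorem pvG_children (s : PvShape) : pvGsum (pvChildren s) + 1 ≤ pvG s.2.2.1 s.2.2.2 := by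
  obtain ⟨x, y, w, h⟩ := s
  simp only [pvChildren, pvG, pvGsum]
  split_ifs with h1 h2 h3
  · have hw := pvMaxHalf h1.1
    have hh := pvMaxHalf h1.2
    have e : ((max (PySem.Int.floordiv w 2) 1).toNat + (max (w - PySem.Int.floordiv w 2) 1).toNat)
        * ((max (PySem.Int.floordiv h 2) 1).toNat + (max (h - PySem.Int.floordiv h 2) 1).toNat)
      = (max (PySem.Int.floordiv w 2) 1).toNat * (max (PySem.Int.floordiv h 2) 1).toNat
        + (max (w - PySem.Int.floordiv w 2) 1).toNat * (max (h - PySem.Int.floordiv h 2) 1).toNat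
        + (max (w - PySem.Int.floordiv w 2) 1).toNat * (max (PySem.Int.floordiv h 2) 1).toNat
        + (max (PySem.Int.floordiv w 2) 1).toNat * (max (h - PySem.Int.floordiv h 2) 1).toNat := by
      ring
    rw [hw, hh] at e
    have q1 := pvOneLe (PySem.Int.floordiv w 2) (PySem.Int.floordiv h 2)
    have q2 := pvOneLe (w - PySem.Int.floordiv w 2) (h - PySem.Int.floordiv h 2)
    have q3 := pvOneLe (w - PySem.Int.floordiv w 2) (PySem.Int.floordiv h 2)
    have q4 := pvOneLe (PySem.Int.floordiv w 2) (h - PySem.Int.floordiv h 2)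
    simp only [List.map_cons, List.map_nil, List.sum_cons, List.sum_nil]
    omega
  · have hw := pvMaxHalf h2
    have e : ((max (PySem.Int.floordiv w 2) 1).toNat + (max (w - PySem.Int.floordiv w 2) 1).toNat)
        * (max h 1).toNat
      = (max (PySem.Int.floordiv w 2) 1).toNat * (max h 1).toNat
        + (max (w - PySem.Int.floordiv w 2) 1).toNat * (max h 1).toNat := by ring
    rw [hw] at e
    have q1 := pvOneLe (PySem.Int.floordiv w 2) h
    have q2 := pvOneLe (w - PySem.Int.floordiv w 2) h
    simp only [List.map_cons, List.map_nil, List.sum_cons, List.sum_nil]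
    omega
  · have hh := pvMaxHalf h3
    have e : (max w 1).toNat
        * ((max (PySem.Int.floordiv h 2) 1).toNat + (max (h - PySem.Int.floordiv h 2) 1).toNat)
      = (max w 1).toNat * (max (PySem.Int.floordiv h 2) 1).toNat
        + (max w 1).toNat * (max (h - PySem.Int.floordiv h 2) 1).toNat := by ring
    rw [hh] at e
    have q1 := pvOneLe w (PySem.Int.floordiv h 2)
    have q2 := pvOneLe w (h - PySem.Int.floordiv h 2)
    simp only [List.map_cons, List.map_nil, List.sum_cons, List.sum_nil]
    omega
  · have := pvOneLe w h
    simp only [List.map_nil, List.sum_nil]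
    omega

theorem pvGsum_cons (s : PvShape) (l : List PvShape) :
    pvGsum (s :: l) = pvG s.2.2.1 s.2.2.2 + pvGsum l := by simp [pvGsum]

theorem pvGsum_flatMap (l : List PvShape) : pvGsum (l.flatMap pvChildren) + l.length ≤ pvGsum l := by
  induction l with
  | nil => simp [pvGsum]
  | cons s t ih =>
    have h := pvG_children s
    simp only [List.flatMap_cons, pvGsum, List.map_append, List.sum_append, List.map_cons,
      List.sum_cons, List.length_cons] at *
    omega

theorem pvGsum_filter (p : PvShape → Bool) (l : List PvShape) :
    pvGsum (l.filter p) + pvGsum (l.filter fun a => !p a) = pvGsum l := by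
  induction l with
  | nil => simp [pvGsum]
  | cons s t ih =>
    by_cases hp : p s <;> simp [hp, pvGsum_cons] <;> omega

theorem pvLenFilter (p : PvShape → Bool) (l : List PvShape) :
    (l.filter p).length + (l.filter fun a => !p a).length = l.length := by
  induction l with
  | nil => simp
  | cons s t ih => by_cases hp : p s <;> simp [hp] <;> omega

theorem pvGsum_next_lt (level : List PvShape) (h : ¬level = []) :
    pvGsum ((level.filter fun r => !pvIsBig r).flatMap pvChildren
            ++ (level.filter pvIsBig).flatMap pvChildren) < pvGsum level := by
  have h1 := pvGsum_flatMap (level.filter fun r => !pvIsBig r)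
  have h2 := pvGsum_flatMap (level.filter pvIsBig)
  have h3 := pvGsum_filter pvIsBig level
  have h4 := pvLenFilter pvIsBig level
  have h5 : 0 < level.length := List.length_pos_iff.mpr h
  simp only [pvGsum, List.map_append, List.sum_append] at *
  omega

-- the while-loop of checkerboard_render (B); fuel is a pure totality guard (provably sufficient)

-- abstract characterisation of one pass of A's inner index loop
def pvPop (r : PvRect) : PvRect := (r.1, r.2.tail)
def pvFreshOf (s : PvShape) : PvRect := pvMkRect s.1 s.2.1 s.2.2.1 s.2.2.2
def pvSweepSpots (rs : List PvRect) : List (Int × Int) := rs.filterMap (fun r => r.2.head?)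
def pvFinIdx : List PvRect → List Nat
  | [] => []
  | r :: rs => (if r.2.length ≤ 1 then [0] else []) ++ (pvFinIdx rs).map (· + 1)
def pvSweepChildren (rs : List PvRect) : List PvRect :=
  rs.flatMap (fun r => if r.2.length ≤ 1 then pvSubdivide r.1 else [])

theorem pvSetApp {a_ : Type} (pre t : List a_) (r v : a_) :
    (pre ++ r :: t).set pre.length v = pre ++ v :: t := by
  induction pre with
  | nil => rfl
  | cons a p ih => simp [List.set_cons_succ, ih]

theorem pvGetDApp {a_ : Type} (pre t : List a_) (r d : a_) :
    (pre ++ r :: t).getD pre.length d = r := by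
  induction pre with
  | nil => rfl
  | cons a p ih =>
    simp only [List.cons_append, List.length_cons, List.getD_cons_succ]
    exact ih

theorem pvInnerFold_gen (todo : List PvRect) : ∀ (pre : List PvRect) (acc : List (Int × Int))
    (itr : List Nat) (rta : List PvRect),
    (List.range' pre.length todo.length).foldl pvInnerStep (pre ++ todo, acc, itr, rta)
      = (pre ++ todo.map pvPop, acc ++ pvSweepSpots todo,
         itr ++ (pvFinIdx todo).map (· + pre.length), rta ++ pvSweepChildren todo) := by
  induction todo with
  | nil => intro pre acc itr rta; simp [pvSweepSpots, pvFinIdx, pvSweepChildren]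
  | cons r t ih =>
    intro pre acc itr rta
    obtain ⟨sh, q⟩ := r
    rw [List.length_cons, List.range'_succ, List.foldl_cons]
    have hstep : pvInnerStep (pre ++ (sh, q) :: t, acc, itr, rta) pre.length
        = (pre ++ pvPop (sh, q) :: t,
           acc ++ (pvSweepSpots [(sh, q)]),
           itr ++ (if q.length <= 1 then [pre.length] else []),
           rta ++ (if q.length <= 1 then pvSubdivide sh else [])) := by
      simp only [pvInnerStep, pvGetDApp, pvSetApp]
      cases q with
      | nil => simp [pvGetNext, pvPop, pvSweepSpots]
      | cons s q' =>
        cases q' with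
        | nil => simp [pvGetNext, pvPop, pvSweepSpots]
        | cons s2 q2 => simp [pvGetNext, pvPop, pvSweepSpots]
    rw [hstep]
    have happ : pre ++ pvPop (sh, q) :: t = (pre ++ [pvPop (sh, q)]) ++ t := by
      simp
    have hlen : pre.length + 1 = (pre ++ [pvPop (sh, q)]).length := by simp
    rw [happ, hlen, ih]
    simp only [Prod.mk.injEq]
    refine ⟨?_, ?_, ?_, ?_⟩
    · simp
    · simp only [pvSweepSpots, List.filterMap_cons, List.append_assoc]
      cases q <;> simp
    · -- indices
      simp only [pvFinIdx, List.map_append, List.map_map, List.append_assoc]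
      refine congrArg _ ?_
      by_cases hq : q.length <= 1
      · simp only [if_pos hq, List.length_append, List.length_cons, List.length_nil]
        refine congrArg₂ _ (by simp) ?_
        apply List.map_congr_left
        intro a _
        simp only [Function.comp_apply]
        omega
      · simp only [if_neg hq, List.length_append, List.length_cons, List.length_nil,
          List.nil_append]
        apply List.map_congr_left
        intro a _
        simp only [Function.comp_apply]
        omega
    · simp only [pvSweepChildren, List.flatMap_cons, List.append_assoc]
  

theorem pvRevFold {b_ : Type} (f : b_ -> Nat -> b_) (xs : List Nat) (b : b_) :
    (List.range xs.length).foldl (fun l i => f l (xs.getD (xs.length - i - 1) 0)) b = xs.reverse.foldl f b := by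
  induction xs generalizing b with
  | nil => rfl
  | cons x t ih =>
    rw [List.length_cons, List.range_succ, List.foldl_append]
    have hcong : (List.range t.length).foldl (fun l i => f l ((x :: t).getD (t.length + 1 - i - 1) 0)) b
        = (List.range t.length).foldl (fun l i => f l (t.getD (t.length - i - 1) 0)) b := by
      apply List.foldl_ext
      intro b i hi
      have hi' : i < t.length := List.mem_range.mp hi
      have h2 : t.length + 1 - i - 1 = (t.length - i - 1) + 1 := by omega
      rw [h2, List.getD_cons_succ]
    have h0 : t.length + 1 - t.length - 1 = 0 := by omega
    simp only [List.foldl_cons, List.foldl_nil, h0, List.getD_cons_zero, hcong, ih,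
      List.reverse_cons, List.foldl_append]

theorem pvRemoveLoop_eq_rev (rs : List PvRect) (itr : List Nat) :
    pvRemoveLoop rs itr = itr.reverse.foldl List.eraseIdx rs :=
  pvRevFold List.eraseIdx itr rs

theorem pvRemoveLoop_cons (rs : List PvRect) (a : Nat) (itr : List Nat) :
    pvRemoveLoop rs (a :: itr) = (pvRemoveLoop rs itr).eraseIdx a := by
  rw [pvRemoveLoop_eq_rev, pvRemoveLoop_eq_rev, List.reverse_cons, List.foldl_append]
  rfl

theorem pvRemoveLoop_shift (x : PvRect) (l : List PvRect) (I : List Nat) :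
    pvRemoveLoop (x :: l) (I.map (· + 1)) = x :: pvRemoveLoop l I := by
  induction I with
  | nil => rfl
  | cons a I ih =>
    rw [List.map_cons, pvRemoveLoop_cons, ih, pvRemoveLoop_cons, List.eraseIdx_cons_succ]

theorem pvInnerFold_eq (rs : List PvRect) (acc : List (Int × Int)) (rta : List PvRect) :
    pvInnerFold rs acc rta = (rs.map pvPop, acc ++ pvSweepSpots rs, pvFinIdx rs, rta ++ pvSweepChildren rs) := by
  have h := pvInnerFold_gen rs [] acc [] rta
  simpa [pvInnerFold, List.range_eq_range'] using h

theorem pvRemove_finIdx (rs : List PvRect) :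
    pvRemoveLoop (rs.map pvPop) (pvFinIdx rs) = (rs.filter fun r => decide (1 < r.2.length)).map pvPop := by
  induction rs with
  | nil => rfl
  | cons r t ih =>
    by_cases hr : r.2.length <= 1
    · have hd : (decide (1 < r.2.length)) = false := by simp; omega
      simp only [pvFinIdx, if_pos hr, List.map_cons, List.singleton_append]
      rw [pvRemoveLoop_cons, pvRemoveLoop_shift, List.eraseIdx_cons_zero, ih]
      simp [hd]
    · have hd : (decide (1 < r.2.length)) = true := by simp; omega
      simp only [pvFinIdx, if_neg hr, List.nil_append, List.map_cons]
      rw [pvRemoveLoop_shift, ih]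
      simp [hd]

theorem pvMoveAll_eq (rs rta : List PvRect) : pvMoveAll rs rta = rs ++ rta := by
  induction rta generalizing rs with
  | nil => simp [pvMoveAll]
  | cons r t ih => rw [pvMoveAll, ih, List.append_assoc, List.singleton_append]

theorem pvG_pos (w h : Int) : 0 < pvG w h := by
  have := pvOneLe w h
  simp only [pvG]
  omega

theorem pvFreshOf_fst (s : PvShape) : (pvFreshOf s).1 = s := by
  obtain ⟨x, y, w, h⟩ := s; rfl

theorem pvFreshOf_snd (s : PvShape) : (pvFreshOf s).2 = pvSpots s := by
  obtain ⟨x, y, w, h⟩ := s; rfl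

theorem pvSubdivide_eq (s : PvShape) : pvSubdivide s = (pvChildren s).map pvFreshOf := by
  obtain ⟨x, y, w, h⟩ := s
  simp only [pvSubdivide, pvChildren]
  split_ifs <;> rfl

theorem pvSpots_len_big (s : PvShape) (h : pvIsBig s = true) : (pvSpots s).length = 3 := by
  obtain ⟨x, y, w, hh⟩ := s
  simp only [pvIsBig, decide_eq_true_eq] at h
  simp [pvSpots, h]

theorem pvSpots_len_small (s : PvShape) (h : pvIsBig s = false) : (pvSpots s).length ≤ 1 := by
  obtain ⟨x, y, w, hh⟩ := s
  simp only [pvIsBig, decide_eq_false_iff_not] at h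
  simp only [pvSpots]
  split_ifs <;> simp_all

theorem pvBig_decide (s : PvShape) : decide (1 < (pvFreshOf s).2.length) = pvIsBig s := by
  rw [pvFreshOf_snd]
  cases hb : pvIsBig s
  · have := pvSpots_len_small s hb; simp; omega
  · have := pvSpots_len_big s hb; simp [this]

theorem pvFilterMap_of_none {a_ b_ : Type} (p : a_ → Bool) (f : a_ → Option b_) :
    ∀ (l : List a_), (∀ a ∈ l, p a = false → f a = none) →
      l.filterMap f = (l.filter p).filterMap f := by
  intro l
  induction l with
  | nil => intro _; rfl
  | cons a t ih =>
    intro h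
    have ht := ih (fun a ha => h a (List.mem_cons_of_mem _ ha))
    cases hp : p a
    · rw [List.filterMap_cons, h a (List.mem_cons_self) hp, List.filter_cons, hp]
      simpa using ht
    · rw [List.filterMap_cons, List.filter_cons, hp]
      simp only [if_true, List.filterMap_cons]
      rw [ht]

theorem pvSweepSpots_map {a_ : Type} (f : a_ → PvRect) (l : List a_) :
    pvSweepSpots (l.map f) = l.filterMap (fun s => (f s).2.head?) := by
  simp [pvSweepSpots, List.filterMap_map]

theorem pvSweepChildren_fresh (R : List PvShape) :
    pvSweepChildren (R.map pvFreshOf)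
      = ((R.filter fun s => !pvIsBig s).flatMap pvChildren).map pvFreshOf := by
  induction R with
  | nil => rfl
  | cons s t ih =>
    simp only [List.map_cons, pvSweepChildren, List.flatMap_cons] at *
    cases hb : pvIsBig s
    · have hlen : (pvFreshOf s).2.length ≤ 1 := by rw [pvFreshOf_snd]; exact pvSpots_len_small s hb
      rw [if_pos hlen, ih, pvFreshOf_fst, pvSubdivide_eq, List.filter_cons]
      simp [hb]
    · have hlen : ¬ (pvFreshOf s).2.length ≤ 1 := by
        rw [pvFreshOf_snd, pvSpots_len_big s hb]; omega
      rw [if_neg hlen, ih, List.filter_cons]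
      simp [hb]

theorem pvPass (k : Nat) (qs : List (List (Int × Int))) (out : List (Int × Int)) :
    qs.foldl (fun o q => if k < q.length then o ++ [q.getD k (0, 0)] else o) out
      = out ++ qs.filterMap (fun q => q[k]?) := by
  induction qs generalizing out with
  | nil => simp
  | cons q t ih =>
    by_cases hk : k < q.length
    · rw [List.foldl_cons, if_pos hk, ih, List.filterMap_cons,
        List.getElem?_eq_getElem hk, List.getD_eq_getElem q (0,0) hk]
      simp
    · rw [List.foldl_cons, if_neg hk, ih, List.filterMap_cons,
        List.getElem?_eq_none_iff.mpr (by omega)]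

theorem pvLoopB_cons (fb : Nat) (R : List PvShape) (acc : List (Int × Int)) (hR : R ≠ []) :
    pvLoopB (fb + 1) R acc
      = pvLoopB fb ((R.filter fun r => !pvIsBig r).flatMap pvChildren
                 ++ (R.filter pvIsBig).flatMap pvChildren)
          (acc ++ R.filterMap (fun s => (pvSpots s)[0]?)
               ++ R.filterMap (fun s => (pvSpots s)[1]?)
               ++ R.filterMap (fun s => (pvSpots s)[2]?)) := by
  rw [pvLoopB, if_neg hR]
  have h3 : List.range 3 = [0, 1, 2] := rfl
  simp only [h3, List.foldl_cons, List.foldl_nil, pvPass, List.filterMap_map, Function.comp_def]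

theorem pvLoopA_succ (f : Nat) (rects : List PvRect) (acc : List (Int × Int)) (rta : List PvRect)
    (h : rects ≠ []) :
    pvLoopA (f + 1) rects acc rta =
      if (pvRemoveLoop (rects.map pvPop) (pvFinIdx rects)).isEmpty then
        pvLoopA f (pvMoveAll (pvRemoveLoop (rects.map pvPop) (pvFinIdx rects))
          (rta ++ pvSweepChildren rects)) (acc ++ pvSweepSpots rects) []
      else
        pvLoopA f (pvRemoveLoop (rects.map pvPop) (pvFinIdx rects))
          (acc ++ pvSweepSpots rects) (rta ++ pvSweepChildren rects) := by
  rw [pvLoopA, List.isEmpty_eq_false_iff.mpr h]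
  simp only [Bool.false_eq_true, if_false, pvInnerFold_eq]

theorem pvLoopA_level (fuel : Nat) : ∀ (fb : Nat) (R : List PvShape) (acc : List (Int × Int)),
    3 * pvGsum R + 1 ≤ fuel → pvGsum R + 1 ≤ fb →
    pvLoopA fuel (R.map pvFreshOf) acc [] = pvLoopB fb R acc := by
  induction fuel using Nat.strong_induction_on with
  | _ fuel ih =>
  intro fb R acc hf hfb
  obtain ⟨f, rfl⟩ : ∃ f, fuel = f + 1 := ⟨fuel - 1, by omega⟩
  obtain ⟨g, rfl⟩ : ∃ g, fb = g + 1 := ⟨fb - 1, by omega⟩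
  by_cases hR : R = []
  · subst hR
    rw [pvLoopB]
    simp [pvLoopA]
  · have hgs : 1 ≤ pvGsum R := by
      obtain ⟨s, t, rfl⟩ := List.exists_cons_of_ne_nil hR
      have := pvG_pos s.2.2.1 s.2.2.2
      rw [pvGsum_cons]; omega
    have hnext := pvGsum_next_lt R hR
    have hAne : (R.map pvFreshOf) ≠ [] := by simpa using hR
    -- iteration 1
    rw [pvLoopA_succ f _ _ _ hAne, pvRemove_finIdx]
    have hfil1 : (R.map pvFreshOf).filter (fun r => decide (1 < r.2.length))
        = (R.filter pvIsBig).map pvFreshOf := by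
      rw [List.filter_map]
      refine congrArg _ (List.filter_congr ?_)
      intro s _
      exact pvBig_decide s
    rw [hfil1, pvSweepChildren_fresh, pvSweepSpots_map]
    have hspots0 : (R.filterMap fun s => (pvFreshOf s).2.head?)
        = R.filterMap (fun s => (pvSpots s)[0]?) := by
      refine List.filterMap_congr ?_
      intro s _
      rw [pvFreshOf_snd, List.head?_eq_getElem?]
    have hpop1 : ((R.filter pvIsBig).map pvFreshOf).map pvPop
        = (R.filter pvIsBig).map (fun s => (s, (pvSpots s).tail)) := by
      rw [List.map_map]
      refine List.map_congr_left ?_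
      intro s _
      simp only [Function.comp_apply, pvPop, pvFreshOf_fst, pvFreshOf_snd]
    rw [hspots0, hpop1]
    have hP1 : R.filterMap (fun s => (pvSpots s)[1]?)
        = (R.filter pvIsBig).filterMap (fun s => (pvSpots s)[1]?) := by
      refine pvFilterMap_of_none pvIsBig _ R ?_
      intro s _ hs
      exact List.getElem?_eq_none_iff.mpr (by have := pvSpots_len_small s hs; omega)
    have hP2 : R.filterMap (fun s => (pvSpots s)[2]?)
        = (R.filter pvIsBig).filterMap (fun s => (pvSpots s)[2]?) := by
      refine pvFilterMap_of_none pvIsBig _ R ?_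
      intro s _ hs
      exact List.getElem?_eq_none_iff.mpr (by have := pvSpots_len_small s hs; omega)
    by_cases hbig : R.filter pvIsBig = []
    · -- every rect finishes in the first pass: one loop iteration per level
      rw [hbig]
      simp only [List.map_nil, List.isEmpty_nil, if_true, pvMoveAll_eq, List.nil_append]
      have hb : 3 * pvGsum ((R.filter fun r => !pvIsBig r).flatMap pvChildren
          ++ (R.filter pvIsBig).flatMap pvChildren) + 1 ≤ f := by omega
      rw [hbig, List.flatMap_nil, List.append_nil] at hb
      have hgb : pvGsum ((R.filter fun r => !pvIsBig r).flatMap pvChildren) + 1 ≤ g := by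
        have := pvGsum_next_lt R hR
        rw [hbig, List.flatMap_nil, List.append_nil] at this
        omega
      rw [ih f (by omega) g _ _ hb hgb, pvLoopB_cons g R acc hR, hP1, hP2, hbig]
      simp [List.flatMap_nil]
    · -- three loop iterations per level
      have hmem : ∀ s ∈ R.filter pvIsBig, pvIsBig s = true := by
        intro s hs; exact (List.mem_filter.mp hs).2
      have h2ne : (R.filter pvIsBig).map (fun s => (s, (pvSpots s).tail)) ≠ [] := by
        simpa using hbig
      have h3ne : (R.filter pvIsBig).map (fun s => (s, (pvSpots s).tail.tail)) ≠ [] := by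
        simpa using hbig
      rw [List.isEmpty_eq_false_iff.mpr h2ne]
      simp only [Bool.false_eq_true, if_false]
      obtain ⟨f2, rfl⟩ : ∃ k, f = k + 2 := ⟨f - 2, by omega⟩
      -- iteration 2
      rw [show f2 + 2 = (f2 + 1) + 1 from rfl]
      rw [pvLoopA_succ (f2 + 1) _ _ _ h2ne, pvRemove_finIdx]
      have hfil2 : ((R.filter pvIsBig).map (fun s => (s, (pvSpots s).tail))).filter
            (fun r => decide (1 < r.2.length))
          = (R.filter pvIsBig).map (fun s => (s, (pvSpots s).tail)) := by
        refine List.filter_eq_self.mpr ?_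
        intro r hr
        obtain ⟨s, hs, rfl⟩ := List.mem_map.mp hr
        simp only [List.length_tail, pvSpots_len_big s (hmem s hs)]
        simp
      have hpop2 : ((R.filter pvIsBig).map (fun s => (s, (pvSpots s).tail))).map pvPop
          = (R.filter pvIsBig).map (fun s => (s, (pvSpots s).tail.tail)) := by
        rw [List.map_map]
        refine List.map_congr_left ?_
        intro s _
        simp [pvPop]
      rw [hfil2, hpop2, List.isEmpty_eq_false_iff.mpr h3ne]
      simp only [Bool.false_eq_true, if_false]
      have hsc2 : pvSweepChildren ((R.filter pvIsBig).map (fun s => (s, (pvSpots s).tail))) = [] := by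
        unfold pvSweepChildren
        refine List.flatMap_eq_nil_iff.mpr ?_
        intro r hr
        obtain ⟨s, hs, rfl⟩ := List.mem_map.mp hr
        rw [if_neg]
        simp only [List.length_tail, pvSpots_len_big s (hmem s hs)]
        omega
      rw [hsc2, List.append_nil, pvSweepSpots_map]
      have hspots1 : ((R.filter pvIsBig).filterMap fun s => ((fun s => (s, (pvSpots s).tail)) s).2.head?)
          = R.filterMap (fun s => (pvSpots s)[1]?) := by
        rw [hP1]
        refine List.filterMap_congr ?_
        intro s _
        simp only [List.head?_tail]
      rw [hspots1]
      -- iteration 3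
      rw [pvLoopA_succ f2 _ _ _ h3ne, pvRemove_finIdx]
      have hfil3 : ((R.filter pvIsBig).map (fun s => (s, (pvSpots s).tail.tail))).filter
            (fun r => decide (1 < r.2.length)) = [] := by
        refine List.filter_eq_nil_iff.mpr ?_
        intro r hr
        obtain ⟨s, hs, rfl⟩ := List.mem_map.mp hr
        simp only [List.length_tail, pvSpots_len_big s (hmem s hs)]
        simp
      rw [hfil3, List.map_nil, List.isEmpty_nil]
      simp only [if_true, pvMoveAll_eq, List.nil_append]
      have hsc3 : pvSweepChildren ((R.filter pvIsBig).map (fun s => (s, (pvSpots s).tail.tail)))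
          = ((R.filter pvIsBig).flatMap pvChildren).map pvFreshOf := by
        unfold pvSweepChildren
        rw [List.flatMap_map]
        have hc : ∀ s ∈ R.filter pvIsBig,
            (fun s => if ((s, (pvSpots s).tail.tail) : PvRect).2.length ≤ 1 then
              pvSubdivide ((s, (pvSpots s).tail.tail) : PvRect).1 else []) s
            = (fun s => (pvChildren s).map pvFreshOf) s := by
          intro s hs
          simp only
          rw [if_pos (by simp [List.length_tail, pvSpots_len_big s (hmem s hs)]), pvSubdivide_eq]
        rw [List.flatMap_congr hc, ← List.map_flatMap]
      rw [hsc3, pvSweepSpots_map]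
      have hspots2 : ((R.filter pvIsBig).filterMap fun s => ((fun s => (s, (pvSpots s).tail.tail)) s).2.head?)
          = R.filterMap (fun s => (pvSpots s)[2]?) := by
        rw [hP2]
        refine List.filterMap_congr ?_
        intro s _
        simp only [List.head?_tail, List.getElem?_tail]
      rw [hspots2, ← List.map_append]
      have hb2 : 3 * pvGsum ((R.filter fun r => !pvIsBig r).flatMap pvChildren
          ++ (R.filter pvIsBig).flatMap pvChildren) + 1 ≤ f2 := by omega
      have hgb2 : pvGsum ((R.filter fun r => !pvIsBig r).flatMap pvChildren
          ++ (R.filter pvIsBig).flatMap pvChildren) + 1 ≤ g := by omega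
      rw [ih f2 (by omega) g _ _ hb2 hgb2, pvLoopB_cons g R acc hR]

-- ===== VERDICT (by name: the statement is the Claim_ definition above) =====
theorem checkerboard_render_spec : Claim_equal_checkerboard_render := by
  intro w h_ _
  unfold Spec_checkerboard_render checkerboard_render checkerboard_render_alt
  have := pvLoopA_level (3 * pvG w h_ + 1) (pvG w h_ + 1) [(0, 0, w, h_)] [(0, 0)]
    (by simp [pvGsum]) (by simp [pvGsum])
  simpa [pvFreshOf, pvMkRect] using this
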